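-- pv_equiv track=rewrite | github.com/SonDo580/dsa-leetcode | 4-StackAndQueue/4.1-Stack/04.make-string-good.py | make_string_good
-- ===== SOURCE A (Python) =====
-- def make_string_good(s: str) -> str:
--     # An empty string is a good string
--     if len(s) == 0:
--         return s
--
--     stack: list[str] = []
--
--     def is_bad(char: str):
--         """
--         Check if the current character and the last item on the stack
--         make the string bad:
--         - are the same character
--         - 1 uppercase, 1 lowercase
--         """
--         return (
--             char.lower() == stack[-1].lower() and
--             char.islower() != stack[-1].islower()
--         )
--
--     for char in s:
--         if len(stack) == 0:
--             stack.append(char)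
--             continue
--
--         if is_bad(char):
--             stack.pop()
--         else:
--             stack.append(char)
--
--     return "".join(stack)
-- ===== SOURCE B (Python) =====
-- def make_string_good(s: str) -> str:
--     # Iterative fixpoint: repeatedly scan left-to-right removing adjacent
--     # bad pairs (same letter, opposite case), until a pass changes nothing.
--     cur = s
--     while True:
--         out = []
--         changed = False
--         i = 0
--         n = len(cur)
--         while i < n:
--             if (
--                 i + 1 < n
--                 and cur[i].lower() == cur[i + 1].lower()
--                 and cur[i].islower() != cur[i + 1].islower()
--             ):
--                 i += 2
--                 changed = True
--             else:
--                 out.append(cur[i])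
--                 i += 1
--         cur = "".join(out)
--         if not changed:
--             return cur
-- ===== Notes on version B (the rewrite author's own statement) =====
-- stated objective: alternative
-- what changed: Replaces the single-pass stack with an iterative fixpoint: repeatedly rescan the string removing adjacent opposite-case pairs and rebuild it, looping until a pass makes no change (correct because the cancellation is confluent).
import Mathlib
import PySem

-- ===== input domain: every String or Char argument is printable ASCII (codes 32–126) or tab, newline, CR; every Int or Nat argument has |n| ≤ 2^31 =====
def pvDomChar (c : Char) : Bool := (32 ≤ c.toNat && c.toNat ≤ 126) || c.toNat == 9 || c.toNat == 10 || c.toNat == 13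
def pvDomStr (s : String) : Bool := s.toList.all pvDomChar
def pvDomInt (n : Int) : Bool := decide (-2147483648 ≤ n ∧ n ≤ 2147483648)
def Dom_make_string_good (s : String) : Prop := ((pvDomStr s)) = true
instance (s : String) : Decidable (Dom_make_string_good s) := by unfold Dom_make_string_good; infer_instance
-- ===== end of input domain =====

-- B replaces A's single stack pass by an iterative fixpoint of left-to-right pair-removal
-- passes (alternative decomposition, not faster); return values proved equal on all of Dom.

-- Both Pythons apply the same test `c1.lower() == c2.lower() and c1.islower() != c2.islower()`
-- to single characters; on single characters str.lower/str.islower are exactly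
-- PySem.Chars.lowerChar / PySem.Chars.islower (exact on the ASCII domain).
def badChar (c d : Char) : Bool :=
  (PySem.Chars.lowerChar c == PySem.Chars.lowerChar d) &&
  (PySem.Chars.islower c != PySem.Chars.islower d)

-- ===== PORT A =====
-- the loop body: append when the stack is empty, pop when is_bad, else append
def stepA (stack : List Char) (c : Char) : List Char :=
  if stack.length = 0 then stack ++ [c]
  else if badChar c stack.getLast! then stack.dropLast   -- stack[-1] of a nonempty stack
  else stack ++ [c]

def make_string_good (s : String) : String :=
  if PySem.Str.len s = 0 then s
  else String.ofList (s.toList.foldl stepA [])           -- "".join(stack)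

-- ===== PORT B =====
-- one left-to-right pass of Source B's inner while loop: returns (out, changed)
def passGo : List Char → List Char × Bool
  | [] => ([], false)
  | [c] => ([c], false)
  | a :: b :: t =>
      if badChar a b then ((passGo t).1, true)           -- i += 2, changed = True
      else
        let r := passGo (b :: t)                         -- out.append(cur[i]), i += 1
        (a :: r.1, r.2)

-- termination of the outer loop: a changing pass strictly shrinks the string
theorem passGo_length : ∀ t : List Char,
    (passGo t).1.length ≤ t.length ∧ ((passGo t).2 = true → (passGo t).1.length < t.length) := by
  intro t
  induction t using passGo.induct with
  | case1 => simp [passGo]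
  | case2 c => simp [passGo]
  | case3 a b t h ih =>
      obtain ⟨ih1, ih2⟩ := ih
      simp [passGo, h]
      omega
  | case4 a b t h ih =>
      obtain ⟨ih1, ih2⟩ := ih
      simp only [List.length_cons] at ih1 ih2
      simp [passGo, h]
      constructor
      · omega
      · intro hc; have := ih2 hc; omega

-- the outer while loop: run a pass; if it changed something, loop, else return
def fixGo (l : List Char) : List Char :=
  if h : (passGo l).2 = true then fixGo (passGo l).1 else (passGo l).1
termination_by l.length
decreasing_by exact (passGo_length l).2 h

def make_string_good_alt (s : String) : String :=
  String.ofList (fixGo s.toList)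

-- ===== PRECONDITION & SPEC =====
def Spec_make_string_good (s : String) (out : String) : Prop := out = make_string_good_alt s
instance (s : String) (out : String) : Decidable (Spec_make_string_good s out) := by unfold Spec_make_string_good; infer_instance

-- ===== CLAIM (what is proved, stated in full; the proofs are below) =====
def Claim_equal_make_string_good : Prop := ∀ (s : String), Dom_make_string_good s → Spec_make_string_good s (make_string_good s)

-- ===== LEMMAS AND PROOFS =====

-- characters are determined by (lowerChar, islower)
theorem char_toNat_le_iff (a c : Char) : (a ≤ c) ↔ a.toNat ≤ c.toNat := by
  rw [Char.le_def, UInt32.le_iff_toNat_le]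
  exact Iff.rfl

theorem islower_iff (c : Char) :
    PySem.Chars.islower c = true ↔ 97 ≤ c.toNat ∧ c.toNat ≤ 122 := by
  simp [PySem.Chars.islower, char_toNat_le_iff]

theorem isupper_iff (c : Char) :
    PySem.Chars.isupper c = true ↔ 65 ≤ c.toNat ∧ c.toNat ≤ 90 := by
  simp [PySem.Chars.isupper, char_toNat_le_iff]

theorem toNat_lowerChar (c : Char) :
    (PySem.Chars.lowerChar c).toNat =
      if 65 ≤ c.toNat ∧ c.toNat ≤ 90 then c.toNat + 32 else c.toNat := by
  unfold PySem.Chars.lowerChar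
  by_cases h : PySem.Chars.isupper c = true
  · have hb := (isupper_iff c).mp h
    rw [if_pos h, if_pos hb, Char.toNat_ofNat, if_pos]
    exact Or.inl (by omega)
  · rw [if_neg h, if_neg]
    intro hb
    exact h ((isupper_iff c).mpr hb)

theorem char_inj (c d : Char)
    (hl : PySem.Chars.lowerChar c = PySem.Chars.lowerChar d)
    (hi : PySem.Chars.islower c = PySem.Chars.islower d) : c = d := by
  apply Char.ext
  apply UInt32.toNat_inj.mp
  have h1 := congrArg Char.toNat hl
  rw [toNat_lowerChar, toNat_lowerChar] at h1
  have hcd : (97 ≤ c.toNat ∧ c.toNat ≤ 122) ↔ (97 ≤ d.toNat ∧ d.toNat ≤ 122) := by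
    rw [← islower_iff, ← islower_iff, hi]
  have : c.toNat = d.toNat := by split_ifs at h1 <;> omega
  exact this

theorem bad_symm (c d : Char) : badChar c d = badChar d c := by
  unfold badChar
  rw [show (PySem.Chars.lowerChar c == PySem.Chars.lowerChar d)
        = (PySem.Chars.lowerChar d == PySem.Chars.lowerChar c) by simp [Bool.beq_comm],
      show (PySem.Chars.islower c != PySem.Chars.islower d)
        = (PySem.Chars.islower d != PySem.Chars.islower c) by
          cases PySem.Chars.islower c <;> cases PySem.Chars.islower d <;> rfl]

theorem bad_bad_eq {a b x : Char} (h1 : badChar a x = true) (h2 : badChar b x = true) : a = b := by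
  simp only [badChar, Bool.and_eq_true, beq_iff_eq, bne_iff_ne] at h1 h2
  refine char_inj a b (h1.1.trans h2.1.symm) ?_
  have ha := h1.2; have hb := h2.2
  cases hA : PySem.Chars.islower a <;> cases hB : PySem.Chars.islower b <;>
    cases hX : PySem.Chars.islower x <;> simp_all

-- the one-pass stack transition, stack stored top-first
def push : Char → List Char → List Char
  | c, [] => [c]
  | c, x :: r => if badChar c x then r else c :: x :: r

def Irr (l : List Char) : Prop := List.IsChain (fun a b => badChar a b = false) l

theorem push_irr {st : List Char} (h : Irr st) (c : Char) : Irr (push c st) := by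
  unfold Irr at *
  cases st with
  | nil => simp only [push]; exact List.isChain_singleton c
  | cons x r =>
      by_cases hb : badChar c x = true
      · rw [show push c (x :: r) = r by simp [push, hb]]; exact h.tail
      · rw [show push c (x :: r) = c :: x :: r by simp [push, hb]]
        exact List.isChain_cons.mpr ⟨by intro y hy; simp at hy; rw [← hy]; exact Bool.eq_false_iff.mpr hb, h⟩

theorem pair_cancel {st : List Char} (hst : Irr st) {a b : Char} (hab : badChar a b = true) :
    push b (push a st) = st := by
  have hba : badChar b a = true := bad_symm a b ▸ hab
  cases st with
  | nil => simp [push, hba]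
  | cons x r =>
      by_cases hax : badChar a x = true
      · rw [show push a (x :: r) = r by simp [push, hax]]
        have hbx : b = x := bad_bad_eq hba (bad_symm a x ▸ hax)
        subst hbx
        cases r with
        | nil => simp [push]
        | cons y r' =>
            have hby : badChar b y = false := (List.isChain_cons.mp hst).1 y rfl
            simp [push, hby]
      · rw [show push a (x :: r) = a :: x :: r by simp [push, hax]]
        simp [push, hba]

theorem pass_foldl : ∀ (t : List Char), ∀ st : List Char, Irr st →
    List.foldl (fun st c => push c st) st (passGo t).1
      = List.foldl (fun st c => push c st) st t := by
  intro t
  induction t using passGo.induct with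
  | case1 => intro st _; simp [passGo]
  | case2 c => intro st _; simp [passGo]
  | case3 a b t h ih =>
      intro st hst
      simp only [passGo, if_pos h, List.foldl_cons]
      rw [ih st hst, pair_cancel hst h]
  | case4 a b t h ih =>
      intro st hst
      simp only [passGo, if_neg h, List.foldl_cons]
      exact ih (push a st) (push_irr hst a)

theorem passGo_keep : ∀ t : List Char, (passGo t).2 = false → (passGo t).1 = t ∧ Irr t := by
  intro t
  induction t using passGo.induct with
  | case1 => simp [passGo]; exact List.isChain_nil
  | case2 c => simp [passGo]; exact List.isChain_singleton c
  | case3 a b t h ih => simp [passGo, h]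
  | case4 a b t h ih =>
      intro hch
      simp only [passGo, if_neg h] at hch ⊢
      obtain ⟨h1, h2⟩ := ih hch
      refine ⟨by simp [h1], ?_⟩
      refine List.isChain_cons.mpr ⟨?_, h2⟩
      intro y hy; simp at hy; rw [← hy]; exact Bool.eq_false_iff.mpr h

theorem irr_foldl_id : ∀ (l : List Char) (st : List Char), Irr (st.reverse ++ l) →
    List.foldl (fun st c => push c st) st l = l.reverse ++ st := by
  intro l
  induction l with
  | nil => intro st _; simp
  | cons c t ih =>
      intro st h
      have hpush : push c st = c :: st := by
        cases st with
        | nil => simp [push]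
        | cons x r =>
            have hxc : badChar x c = false := by
              have h' : List.IsChain (fun a b => badChar a b = false) ((x :: r).reverse ++ c :: t) := h
              have := (List.isChain_append.mp h').2.2
              exact this x (by simp) c (by simp)
            have hcx : badChar c x = false := bad_symm c x ▸ hxc
            simp [push, hcx]
      rw [List.foldl_cons, hpush, ih (c :: st) (by simpa using h)]
      simp

theorem stepA_rev (r : List Char) (c : Char) : (stepA r.reverse c).reverse = push c r := by
  cases r with
  | nil => simp [stepA, push]
  | cons x t =>
      unfold stepA push
      rw [show (x :: t).reverse = t.reverse ++ [x] by simp]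
      rw [if_neg (by simp)]
      rw [show (t.reverse ++ [x]).getLast! = x by simp, List.dropLast_concat]
      by_cases hb : badChar c x = true
      · simp [hb]
      · simp [hb]

theorem foldlA_rev : ∀ (l : List Char) (st : List Char),
    (List.foldl stepA st l).reverse = List.foldl (fun st c => push c st) st.reverse l := by
  intro l
  induction l with
  | nil => intro st; simp
  | cons c t ih =>
      intro st
      rw [List.foldl_cons, List.foldl_cons, ih (stepA st c)]
      rw [show stepA st c = stepA st.reverse.reverse c by simp, stepA_rev st.reverse c]

theorem fix_eq : ∀ l : List Char,
    fixGo l = (List.foldl (fun st c => push c st) [] l).reverse := by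
  intro l
  induction l using fixGo.induct with
  | case1 l h ih =>
      rw [fixGo, dif_pos h, ih, pass_foldl l [] List.isChain_nil]
  | case2 l h =>
      rw [fixGo, dif_neg h]
      obtain ⟨h1, h2⟩ := passGo_keep l (Bool.eq_false_iff.mpr h)
      rw [h1, irr_foldl_id l [] (by simpa using h2)]
      simp

-- ===== VERDICT (by name: the statement is the Claim_ definition above) =====
theorem make_string_good_spec : Claim_equal_make_string_good := by
  intro s _
  unfold Spec_make_string_good make_string_good make_string_good_alt
  by_cases h : PySem.Str.len s = 0
  · rw [if_pos h]
    have hl : s.toList = [] := by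
      have := PySem.Str.len_eq s
      rw [h] at this
      have hz : s.toList.length = 0 := by exact_mod_cast this.symm
      exact List.length_eq_zero_iff.mp hz
    rw [hl]
    rw [show fixGo [] = [] by rw [fixGo]; simp [passGo]]
    rw [show s = String.ofList [] by rw [← @String.ofList_toList s, hl]]
  · have hA := foldlA_rev s.toList []
    simp only [List.reverse_nil] at hA
    rw [if_neg h, fix_eq, ← hA, List.reverse_reverse]
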